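-- pv_equiv track=rewrite | github.com/irisp34/o-nlogn- | SpeechRecog/todoListFunction.py | textToTask
-- ===== SOURCE A (Python) =====
-- def textToTask(text):
--     textList = text.split(" ")
--     vals = []
--     keys = ["add","remove","delete"]
--     for i in keys:
--         if i in textList:
--             vals.append(textList.index(i))
--     cut = textList[min(vals)+1:-5]
--     task = " ".join(cut)
--     return task, textList[min(vals)]
-- ===== SOURCE B (Python) =====
-- def textToTask(text):
--     words = text.split(" ")
--     keyset = {"add", "remove", "delete"}
--     k = min(i for i, w in enumerate(words) if w in keyset)
--     return " ".join(words[k + 1:-5]), words[k]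
-- ===== Notes on version B (the rewrite author's own statement) =====
-- stated objective: simpler
-- what changed: Replaces the three per-keyword list.index scans collected into a list and minimised with one enumerate pass that takes the minimum index whose token is a keyword (the first keyword occurrence), then slices and joins as before; raises the same ValueError (min of empty sequence) when no keyword occurs.
import Mathlib
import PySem

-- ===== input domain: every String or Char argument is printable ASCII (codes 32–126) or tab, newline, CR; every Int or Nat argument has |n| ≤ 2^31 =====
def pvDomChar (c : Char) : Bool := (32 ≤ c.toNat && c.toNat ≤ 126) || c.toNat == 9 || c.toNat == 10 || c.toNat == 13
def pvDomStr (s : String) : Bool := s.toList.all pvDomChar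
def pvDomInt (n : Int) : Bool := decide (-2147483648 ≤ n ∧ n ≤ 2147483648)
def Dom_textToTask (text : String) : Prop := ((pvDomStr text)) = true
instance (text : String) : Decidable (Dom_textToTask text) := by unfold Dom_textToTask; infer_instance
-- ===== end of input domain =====

-- B replaces the three per-keyword .index scans + min with a single enumerate pass taking the
-- minimal index whose token is a keyword (objective: simpler, one traversal).

-- ===== PORT A =====
def textToTask (text : String) : String × String :=
  let textList := (PySem.Str.split? text " ").getD []   -- text.split(" "): sep ≠ "" so split? is always some
  let keys : List String := ["add", "remove", "delete"]
  let vals : List Nat := keys.foldl (fun vals i =>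
      if textList.contains i then vals ++ [(PySem.List.index? textList i).getD 0] else vals) []
      -- textList.index(i) guarded by `i in textList`, so index? is some; getD 0 is never the default
  -- min(vals) raises ValueError when vals = [] — exactly the inputs Pre_ excludes
  let m : Nat := (PySem.List.min? vals (fun x => x)).getD 0
  let cut := PySem.List.slice textList (some ((m : Int) + 1)) (some (-5))
  let task := PySem.Str.join " " cut
  (task, PySem.List.pyGetD textList (m : Int) "")   -- m is a valid index (an index? result), no default hit

-- ===== PORT B =====
def textToTask_alt (text : String) : String × String :=
  let words := (PySem.Str.split? text " ").getD []   -- text.split(" "): sep ≠ "" so split? is always some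
  let keyset := PySem.Set.ofList ["add", "remove", "delete"]
  -- min(i for i, w in enumerate(words) if w in keyset); ValueError when empty — excluded by Pre_
  let k : Int := (PySem.List.min?
      (((PySem.List.enumerate words).filter (fun p => keyset.contains p.2)).map (fun p => p.1))
      (fun x => x)).getD 0
  (PySem.Str.join " " (PySem.List.slice words (some (k + 1)) (some (-5))),
   PySem.List.pyGetD words k "")

-- ===== PRECONDITION & SPEC =====
-- Pre_ excludes exactly the inputs on which both Pythons raise ValueError (min of an empty
-- sequence): no keyword occurs among the split tokens.
def Pre_textToTask (text : String) : Prop :=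
  "add" ∈ (PySem.Str.split? text " ").getD [] ∨
  "remove" ∈ (PySem.Str.split? text " ").getD [] ∨
  "delete" ∈ (PySem.Str.split? text " ").getD []
instance (text : String) : Decidable (Pre_textToTask text) := by unfold Pre_textToTask; infer_instance
def pvWitness_textToTask : String := "please add buy milk to my list one two three four five"
def Spec_textToTask (text : String) (out : String × String) : Prop := out = textToTask_alt text
instance (text : String) (out : String × String) : Decidable (Spec_textToTask text out) := by unfold Spec_textToTask; infer_instance

-- ===== CLAIM (what is proved, stated in full; the proofs are below) =====
def Claim_equal_textToTask : Prop := ∀ (text : String), Dom_textToTask text → Pre_textToTask text → Spec_textToTask text (textToTask text)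

-- ===== LEMMAS AND PROOFS =====

-- `m` is the position of the first keyword token of `ws`
def FirstKey (ws : List String) (m : Nat) : Prop :=
  ∃ hm : m < ws.length,
    ws[m] ∈ (["add", "remove", "delete"] : List String) ∧
    ∀ i (_ : i < m), ws[i] ∉ (["add", "remove", "delete"] : List String)

theorem FirstKey_unique {ws : List String} {m m' : Nat}
    (h : FirstKey ws m) (h' : FirstKey ws m') : m = m' := by
  obtain ⟨hm, hk, hmin⟩ := h
  obtain ⟨hm', hk', hmin'⟩ := h'
  rcases Nat.lt_trichotomy m m' with hlt | heq | hgt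
  · exact absurd hk (hmin' m hlt)
  · exact heq
  · exact absurd hk' (hmin m' hgt)

-- first-occurrence index is ≤ any occurrence
theorem index?_le_of_getElem {ws : List String} {v : String} {y i : Nat}
    (hy : PySem.List.index? ws v = some y) (hi : i < ws.length) (hv : ws[i] = v) : y ≤ i := by
  obtain ⟨hk, _, hfirst⟩ := PySem.List.getElem_of_index?_eq_some hy
  by_contra h
  exact hfirst i (by omega) hv

-- membership in A's `vals` list
theorem mem_valsA (ws : List String) (y : Nat) :
    y ∈ (["add", "remove", "delete"] : List String).foldl (fun vals i =>
        if ws.contains i then vals ++ [(PySem.List.index? ws i).getD 0] else vals) [] ↔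
    ∃ key ∈ (["add", "remove", "delete"] : List String), PySem.List.index? ws key = some y := by
  rw [PySem.List.foldl_append_if (fun i => ws.contains i) (fun i => (PySem.List.index? ws i).getD 0)]
  simp only [List.nil_append, List.mem_map, List.mem_filter]
  constructor
  · rintro ⟨key, ⟨hkK, hkw⟩, hval⟩
    refine ⟨key, hkK, ?_⟩
    rcases hidx : PySem.List.index? ws key with _ | n
    · exact absurd (List.contains_iff_mem.mp hkw) ((PySem.List.index?_eq_none_iff ws key).mp hidx)
    · rw [hidx, Option.getD_some] at hval
      rw [hval]
  · rintro ⟨key, hkK, hidx⟩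
    refine ⟨key, ⟨hkK, List.contains_iff_mem.mpr ((PySem.List.index?_isSome_iff ws key).mp
      (by rw [hidx]; rfl))⟩, by rw [hidx]; rfl⟩

-- membership in B's filtered-enumerate index list
theorem mem_fstsB (ws : List String) (y : Int) :
    y ∈ ((PySem.List.enumerate ws).filter
          (fun p => (PySem.Set.ofList (["add", "remove", "delete"] : List String)).contains p.2)).map
          (fun p => p.1) ↔
    ∃ n : Nat, ∃ hn : n < ws.length, y = (n : Int) ∧
      ws[n] ∈ (["add", "remove", "delete"] : List String) := by
  simp only [List.mem_map, List.mem_filter, PySem.List.mem_enumerate_iff]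
  constructor
  · rintro ⟨p, ⟨⟨n, hn, hp⟩, hc⟩, hy⟩
    subst hp
    refine ⟨n, hn, by simpa using hy.symm, ?_⟩
    have := (PySem.Set.contains_iff _ _).mp hc
    simpa [PySem.Set.mem_ofList] using this
  · rintro ⟨n, hn, hy, hk⟩
    exact ⟨((n : Int), ws[n]), ⟨⟨n, hn, by simp⟩,
      (PySem.Set.contains_iff _ _).mpr ((PySem.Set.mem_ofList _ _).mpr hk)⟩, by simp [hy]⟩

-- A's min(vals) is the first-keyword position
theorem A_first (ws : List String)
    (hpre : "add" ∈ ws ∨ "remove" ∈ ws ∨ "delete" ∈ ws) :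
    ∃ m : Nat, PySem.List.min?
        ((["add", "remove", "delete"] : List String).foldl (fun vals i =>
          if ws.contains i then vals ++ [(PySem.List.index? ws i).getD 0] else vals) [])
        (fun x => x) = some m ∧ FirstKey ws m := by
  set vals := (["add", "remove", "delete"] : List String).foldl (fun vals i =>
      if ws.contains i then vals ++ [(PySem.List.index? ws i).getD 0] else vals) [] with hvals
  have hne : vals ≠ [] := by
    obtain ⟨key, hkK, hkw⟩ : ∃ key ∈ (["add", "remove", "delete"] : List String), key ∈ ws := by
      rcases hpre with h | h | h
      · exact ⟨"add", by simp, h⟩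
      · exact ⟨"remove", by simp, h⟩
      · exact ⟨"delete", by simp, h⟩
    obtain ⟨n, hidx⟩ := Option.isSome_iff_exists.mp ((PySem.List.index?_isSome_iff ws key).mpr hkw)
    intro hnil
    have : n ∈ vals := (mem_valsA ws n).mpr ⟨key, hkK, hidx⟩
    simp [hnil] at this
  rcases hmin : PySem.List.min? vals (fun x => x) with _ | m
  · exact absurd ((PySem.List.min?_eq_none_iff vals _).mp hmin) hne
  refine ⟨m, rfl, ?_⟩
  have hmem := PySem.List.min?_mem hmin
  obtain ⟨key, hkK, hidx⟩ := (mem_valsA ws m).mp hmem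
  obtain ⟨hm, hgetm, _⟩ := PySem.List.getElem_of_index?_eq_some hidx
  refine ⟨hm, by rw [hgetm]; exact hkK, ?_⟩
  intro i hi hik
  have hiw : ws[i] ∈ ws := List.getElem_mem _
  obtain ⟨y, hidx'⟩ := Option.isSome_iff_exists.mp ((PySem.List.index?_isSome_iff ws ws[i]).mpr hiw)
  have hy : y ∈ vals := (mem_valsA ws y).mpr ⟨ws[i], hik, hidx'⟩
  have hle := PySem.List.min?_isMin hmin y hy
  have := index?_le_of_getElem hidx' (by omega) rfl
  simp at hle
  omega

-- B's min over the filtered enumerate is the first-keyword position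
theorem B_first (ws : List String)
    (hpre : "add" ∈ ws ∨ "remove" ∈ ws ∨ "delete" ∈ ws) :
    ∃ m : Nat, PySem.List.min?
        (((PySem.List.enumerate ws).filter
          (fun p => (PySem.Set.ofList (["add", "remove", "delete"] : List String)).contains p.2)).map
          (fun p => p.1)) (fun x => x) = some ((m : Int)) ∧ FirstKey ws m := by
  set fsts := ((PySem.List.enumerate ws).filter
      (fun p => (PySem.Set.ofList (["add", "remove", "delete"] : List String)).contains p.2)).map
      (fun p => p.1) with hfsts
  have hne : fsts ≠ [] := by
    obtain ⟨key, hkK, hkw⟩ : ∃ key ∈ (["add", "remove", "delete"] : List String), key ∈ ws := by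
      rcases hpre with h | h | h
      · exact ⟨"add", by simp, h⟩
      · exact ⟨"remove", by simp, h⟩
      · exact ⟨"delete", by simp, h⟩
    obtain ⟨n, hn, hgn⟩ := List.mem_iff_getElem.mp hkw
    intro hnil
    have : ((n : Int)) ∈ fsts := (mem_fstsB ws _).mpr ⟨n, hn, rfl, by rw [hgn]; exact hkK⟩
    simp [hnil] at this
  rcases hmin : PySem.List.min? fsts (fun x => x) with _ | k
  · exact absurd ((PySem.List.min?_eq_none_iff fsts _).mp hmin) hne
  have hmem := PySem.List.min?_mem hmin
  obtain ⟨m, hm, hk, hkey⟩ := (mem_fstsB ws k).mp hmem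
  subst hk
  refine ⟨m, rfl, hm, hkey, ?_⟩
  intro i hi hik
  have : ((i : Int)) ∈ fsts := (mem_fstsB ws _).mpr ⟨i, by omega, rfl, hik⟩
  have hle := PySem.List.min?_isMin hmin _ this
  simp at hle
  omega

-- ===== VERDICT (by name: the statement is the Claim_ definition above) =====
theorem textToTask_spec : Claim_equal_textToTask := by
  intro text _ hpre
  unfold Spec_textToTask textToTask textToTask_alt
  set ws := (PySem.Str.split? text " ").getD [] with hws
  have hpre' : "add" ∈ ws ∨ "remove" ∈ ws ∨ "delete" ∈ ws := hpre
  obtain ⟨m, hminA, hfA⟩ := A_first ws hpre'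
  obtain ⟨m', hminB, hfB⟩ := B_first ws hpre'
  have hmm : m = m' := FirstKey_unique hfA hfB
  subst hmm
  simp only [hminA, hminB, Option.getD_some]
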